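-- pv_equiv track=rewrite | github.com/vstrimaitis/aoc-2020 | 17/sol.py | get_neigh_coords
-- ===== SOURCE A (Python) =====
-- import itertools
--
-- def get_neigh_coords(coord):
--     c = []
--     deltas = list(itertools.product([-1, 0, 1], repeat=len(coord)))
--     for delta in deltas:
--         if all(i == 0 for i in delta):
--             continue
--         new_c = tuple([x+dx for x, dx in zip(coord, delta)])
--         c.append(new_c)
--     return c
-- ===== SOURCE B (Python) =====
-- def get_neigh_coords(coord):
--     d = len(coord)
--     total = 3 ** d
--     center = (total - 1) // 2
--     res = []
--     for n in range(total):
--         if n == center: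
--             continue
--         m = n
--         delta = [0] * d
--         for j in range(d - 1, -1, -1):
--             delta[j] = m % 3 - 1
--             m //= 3
--         res.append(tuple(x + dx for x, dx in zip(coord, delta)))
--     return res
-- ===== Notes on version B (the rewrite author's own statement) =====
-- stated objective: alternative
-- what changed: Replaces the itertools.product cartesian enumeration of delta tuples with a single counter over 0..3**d-1 decoded into base-3 digits, skipping the all-zero delta arithmetically as the center index (3**d-1)//2 instead of testing each tuple for all-zeros.
import Mathlib
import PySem

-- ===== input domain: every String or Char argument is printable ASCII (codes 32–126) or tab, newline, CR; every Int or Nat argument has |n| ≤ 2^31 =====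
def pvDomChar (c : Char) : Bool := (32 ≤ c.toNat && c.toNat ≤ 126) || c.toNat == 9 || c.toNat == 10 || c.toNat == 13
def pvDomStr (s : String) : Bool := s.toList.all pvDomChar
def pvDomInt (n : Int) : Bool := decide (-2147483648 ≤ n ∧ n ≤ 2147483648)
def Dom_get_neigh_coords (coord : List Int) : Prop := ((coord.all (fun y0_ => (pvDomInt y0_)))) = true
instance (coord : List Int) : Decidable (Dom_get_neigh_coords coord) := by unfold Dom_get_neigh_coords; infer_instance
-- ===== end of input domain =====

-- B replaces itertools.product by base-3 decoding of a single counter and skips the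
-- center index arithmetically (objective: alternative decomposition, same output order).

-- ===== PORT A =====
-- itertools.product([-1,0,1], repeat=d): lexicographic, first factor outermost
def prod3 : Nat → List (List Int)
  | 0 => [[]]
  | d+1 => ([-1, 0, 1] : List Int).flatMap (fun x => (prod3 d).map (fun t => x :: t))

def get_neigh_coords (coord : List Int) : List (List Int) :=
  let deltas := prod3 coord.length
  deltas.foldl (fun c delta =>
    if delta.all (fun i => i == 0) then c
    else c ++ [(coord.zip delta).map (fun p => p.1 + p.2)]) []

-- ===== PORT B =====
-- Source B's inner loop: fills delta[j] for j = d-1 … 0 with m % 3 - 1, m //= 3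
def decode3 : Nat → Nat → List Int
  | _, 0 => []
  | m, d+1 => decode3 (m / 3) d ++ [((m % 3 : Nat) : Int) - 1]

def get_neigh_coords_alt (coord : List Int) : List (List Int) :=
  let d := coord.length
  let total := 3 ^ d
  let center := (total - 1) / 2
  -- range(total): total ≥ 0 always, so Nat range is exact
  (List.range total).foldl (fun res n =>
    if n == center then res
    else res ++ [(coord.zip (decode3 n d)).map (fun p => p.1 + p.2)]) []

-- ===== PRECONDITION & SPEC =====
def Spec_get_neigh_coords (coord : List Int) (out : List (List Int)) : Prop := out = get_neigh_coords_alt coord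
instance (coord : List Int) (out : List (List Int)) : Decidable (Spec_get_neigh_coords coord out) := by unfold Spec_get_neigh_coords; infer_instance

-- ===== CLAIM (what is proved, stated in full; the proofs are below) =====
def Claim_equal_get_neigh_coords : Prop := ∀ (coord : List Int), Dom_get_neigh_coords coord → Spec_get_neigh_coords coord (get_neigh_coords coord)

-- ===== LEMMAS AND PROOFS =====

-- 'if p(x): continue; out.append(f(x))' as filter+map
theorem foldl_skip_if {α β : Type} (p : α → Bool) (f : α → β) :
    ∀ (l : List α) (acc : List β),
      l.foldl (fun c x => if p x then c else c ++ [f x]) acc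
        = acc ++ (l.filter (fun x => !p x)).map f := by
  intro l
  induction l with
  | nil => simp
  | cons x xs ih =>
      intro acc
      by_cases h : p x = true <;> simp [List.foldl_cons, h, ih]

theorem range_mul3 (m : Nat) :
    List.range (m * 3) = (List.range m).flatMap (fun q => [q * 3, q * 3 + 1, q * 3 + 2]) := by
  induction m with
  | zero => simp
  | succ m ih =>
      have h3 : (m + 1) * 3 = ((m * 3 + 1) + 1) + 1 := by ring
      rw [h3, List.range_succ, List.range_succ, List.range_succ, ih, List.range_succ,
        List.flatMap_append]
      simp

theorem prod3_snoc (d : Nat) :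
    prod3 (d + 1) = (prod3 d).flatMap (fun t => [t ++ [-1], t ++ [0], t ++ [1]]) := by
  induction d with
  | zero => decide
  | succ d ih =>
      conv_lhs => rw [show prod3 (d + 1 + 1)
        = ([-1, 0, 1] : List Int).flatMap (fun x => (prod3 (d+1)).map (fun t => x :: t)) from rfl,
        ih]
      conv_rhs => rw [show prod3 (d + 1)
        = ([-1, 0, 1] : List Int).flatMap (fun x => (prod3 d).map (fun t => x :: t)) from rfl]
      simp [List.map_flatMap, List.flatMap_map]

theorem prod3_eq_decode (d : Nat) :
    prod3 d = (List.range (3 ^ d)).map (fun n => decode3 n d) := by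
  induction d with
  | zero => simp [prod3, decode3]
  | succ d ih =>
      rw [prod3_snoc, ih, pow_succ, range_mul3]
      rw [List.flatMap_map, List.map_flatMap]
      refine List.flatMap_congr (fun q _ => ?_)
      have h0 : (q * 3) / 3 = q ∧ (q * 3) % 3 = 0 := by omega
      have h1 : (q * 3 + 1) / 3 = q ∧ (q * 3 + 1) % 3 = 1 := by omega
      have h2 : (q * 3 + 2) / 3 = q ∧ (q * 3 + 2) % 3 = 2 := by omega
      simp [decode3, h0.1, h1.1, h2.1]

theorem decode3_all_zero (d : Nat) :
    ∀ n : Nat, n < 3 ^ d →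
      (((decode3 n d).all (fun i => i == 0)) = true ↔ n = (3 ^ d - 1) / 2) := by
  induction d with
  | zero =>
      intro n hn
      simp [decode3]
      omega
  | succ d ih =>
      intro n hn
      have hpow : 3 ^ (d + 1) = 3 * 3 ^ d := by ring
      have hpos : 1 ≤ 3 ^ d := Nat.one_le_pow _ _ (by norm_num)
      have hodd : 3 ^ d % 2 = 1 := by
        rw [Nat.pow_mod]; simp
      have hdiv : n / 3 < 3 ^ d := by omega
      have hIH := ih (n / 3) hdiv
      have hlast : ((((n % 3 : Nat) : Int) - 1 == 0) = true) ↔ n % 3 = 1 := by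
        simp [sub_eq_zero]
        omega
      rw [show decode3 n (d + 1) = decode3 (n / 3) d ++ [((n % 3 : Nat) : Int) - 1] from rfl]
      rw [List.all_append]
      simp only [List.all_cons, List.all_nil, Bool.and_true, Bool.and_eq_true]
      rw [hIH] at *
      constructor
      · rintro ⟨h1, h2⟩
        rw [hlast] at h2
        omega
      · intro h
        refine ⟨by omega, ?_⟩
        rw [hlast]
        omega

-- ===== VERDICT (by name: the statement is the Claim_ definition above) =====
theorem get_neigh_coords_spec : Claim_equal_get_neigh_coords := by
  intro coord _
  show get_neigh_coords coord = get_neigh_coords_alt coord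
  unfold get_neigh_coords get_neigh_coords_alt
  simp only []
  rw [foldl_skip_if, foldl_skip_if, prod3_eq_decode, List.filter_map, List.map_map]
  rw [List.nil_append, List.nil_append]
  have hfil : (List.range (3 ^ coord.length)).filter
        (fun n => !((decode3 n coord.length).all (fun i => i == 0)))
      = (List.range (3 ^ coord.length)).filter
        (fun n => !(n == (3 ^ coord.length - 1) / 2)) := by
    refine List.filter_congr (fun n hn => ?_)
    have hlt : n < 3 ^ coord.length := List.mem_range.mp hn
    have h := decode3_all_zero coord.length n hlt
    have hb : ((n == (3 ^ coord.length - 1) / 2) = true) ↔ n = (3 ^ coord.length - 1) / 2 :=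
      beq_iff_eq
    cases ha : (decode3 n coord.length).all (fun i => i == 0) <;>
      cases hc : (n == (3 ^ coord.length - 1) / 2) <;> simp_all
  rw [show (fun n => !((decode3 n coord.length).all (fun i => i == 0)))
      = ((fun δ : List Int => !(δ.all (fun i => i == 0))) ∘ fun n => decode3 n coord.length)
      from rfl] at hfil
  rw [hfil]
  rfl
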